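-- pv_equiv track=rewrite | github.com/The-Elfinator/Bioinf-2024 | task6/MassSpec.py | ideal_spectrum
-- ===== SOURCE A (Python) =====
-- alphabet = ['A', 'C', 'D', 'E', 'F', 'G', 'H', 'I', 'K', 'L', 'M', 'N', 'P', 'Q', 'R', 'S', 'T', 'V', 'W', 'Y']
--
-- masses =   [71 , 103, 115, 129, 147,  57, 137, 113, 128, 113, 131, 114,  97, 128,  156, 87, 101,  99, 186, 163]
--
-- def get_mass(acid):
--     ind = alphabet.index(acid)
--     return masses[ind]
--
-- def ideal_spectrum(s):
--     n = len(s)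
--     spec = {0}
--     mass_pref = [0 for _ in range(n)]
--     mass_pref[0] = get_mass(s[0])
--     for i in range(1, n):
--         mass_pref[i] = mass_pref[i - 1] + get_mass(s[i])
--     mass_suff = [0 for _ in range(n)]
--     mass_suff[-1] = get_mass(s[-1])
--     for i in range(n - 2, -1, -1):
--         mass_suff[i] = mass_suff[i + 1] + get_mass(s[i])
--     for m in mass_pref:
--         spec.add(m)
--     for m in mass_suff:
--         spec.add(m)
--     ideal_spec = sorted(spec)
--     return ideal_spec
-- ===== SOURCE B (Python) =====
-- alphabet = ['A', 'C', 'D', 'E', 'F', 'G', 'H', 'I', 'K', 'L', 'M', 'N', 'P', 'Q', 'R', 'S', 'T', 'V', 'W', 'Y']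
--
-- masses =   [71 , 103, 115, 129, 147,  57, 137, 113, 128, 113, 131, 114,  97, 128,  156, 87, 101,  99, 186, 163]
--
-- def get_mass(acid):
--     ind = alphabet.index(acid)
--     return masses[ind]
--
-- def ideal_spectrum(s):
--     # No set and no sort: prefix masses (with 0) ascend, suffix masses from a
--     # backward scan ascend too (all residue masses are positive), so the sorted
--     # distinct spectrum is a linear duplicate-dropping merge of the two lists.
--     pref = [0]
--     acc = 0
--     for c in s:
--         acc += get_mass(c)
--         pref.append(acc)
--     suf = []
--     acc = 0
--     for c in reversed(s):
--         acc += get_mass(c)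
--         suf.append(acc)
--     out = []
--     i = j = 0
--     while i < len(pref) and j < len(suf):
--         if pref[i] < suf[j]:
--             out.append(pref[i]); i += 1
--         elif suf[j] < pref[i]:
--             out.append(suf[j]); j += 1
--         else:
--             out.append(pref[i]); i += 1; j += 1
--     out.extend(pref[i:])
--     out.extend(suf[j:])
--     return out
-- ===== Notes on version B (the rewrite author's own statement) =====
-- stated objective: alternative
-- what changed: B builds no set and never sorts: it produces the ascending prefix-mass list and the ascending suffix-mass list (one forward and one backward accumulation) and emits the spectrum by a linear duplicate-dropping two-pointer merge, replacing A's set insertion plus sorted().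
import Mathlib
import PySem

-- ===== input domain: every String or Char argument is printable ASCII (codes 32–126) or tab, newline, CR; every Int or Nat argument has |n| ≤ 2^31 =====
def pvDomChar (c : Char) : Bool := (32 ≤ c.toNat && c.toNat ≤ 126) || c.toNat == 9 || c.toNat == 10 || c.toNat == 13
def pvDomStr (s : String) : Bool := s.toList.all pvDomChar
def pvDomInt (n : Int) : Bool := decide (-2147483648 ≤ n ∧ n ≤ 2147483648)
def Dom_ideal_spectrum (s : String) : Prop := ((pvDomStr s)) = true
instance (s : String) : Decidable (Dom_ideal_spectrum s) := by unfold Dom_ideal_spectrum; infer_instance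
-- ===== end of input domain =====

-- B builds no set and never sorts: the ascending prefix-mass and suffix-mass
-- lists are combined by a linear duplicate-dropping two-pointer merge; return
-- values only, claimed on non-empty strings over the 20-letter alphabet.

-- ===== PORT A =====
def pvAlpha : List Char :=
  ['A','C','D','E','F','G','H','I','K','L','M','N','P','Q','R','S','T','V','W','Y']
def pvMasses : List Int :=
  [71,103,115,129,147,57,137,113,128,113,131,114,97,128,156,87,101,99,186,163]

-- get_mass; total form: under Pre_ every residue is in pvAlpha, so the
-- Option lookups always succeed (Python raises ValueError outside Pre_).
def getMass (c : Char) : Int :=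
  match PySem.List.index? pvAlpha c with
  | some i => (PySem.List.pyGet? pvMasses (i : Int)).getD 0
  | none => 0

-- mass_pref built left to right carrying the previous entry (A's first loop)
def prefA : List Char → Int → List Int
  | [], _ => []
  | c :: rest, acc => (acc + getMass c) :: prefA rest (acc + getMass c)

-- mass_suff built right to left carrying the next entry (A's second loop)
def suffA : List Char → List Int
  | [] => []
  | c :: rest =>
    match suffA rest with
    | [] => [getMass c]
    | m :: ms => (getMass c + m) :: m :: ms

def ideal_spectrum (s : String) : List Int :=
  let cs := s.toList
  let mass_pref := prefA cs 0
  let mass_suff := suffA cs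
  let spec := PySem.Set.update (PySem.Set.update (PySem.Set.ofList [(0 : Int)]) mass_pref) mass_suff
  PySem.List.sorted spec (fun x => x) false

-- ===== PORT B =====
-- B's while-loop: two-pointer merge of two lists, dropping cross duplicates
def mergeB : List Int → List Int → List Int
  | [], ys => ys
  | x :: xs, [] => x :: xs
  | x :: xs, y :: ys =>
    if x < y then x :: mergeB xs (y :: ys)
    else if y < x then y :: mergeB (x :: xs) ys
    else x :: mergeB xs ys
termination_by a b => a.length + b.length

def ideal_spectrum_alt (s : String) : List Int :=
  let cs := s.toList
  -- forward accumulation: pref = [0] then every running total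
  let p := cs.foldl (fun (st : Int × List Int) c =>
      (st.1 + getMass c, st.2 ++ [st.1 + getMass c])) ((0 : Int), [(0 : Int)])
  -- backward accumulation: ascending suffix masses
  let q := cs.reverse.foldl (fun (st : Int × List Int) c =>
      (st.1 + getMass c, st.2 ++ [st.1 + getMass c])) ((0 : Int), ([] : List Int))
  mergeB p.2 q.2

-- ===== PRECONDITION & SPEC =====
-- Pre_ excludes the empty string (A raises IndexError there) and strings with a
-- residue outside the amino-acid alphabet (get_mass raises ValueError there).
def Pre_ideal_spectrum (s : String) : Prop :=
  s.toList ≠ [] ∧ (s.toList.all (fun c => pvAlpha.contains c)) = true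
instance (s : String) : Decidable (Pre_ideal_spectrum s) := by
  unfold Pre_ideal_spectrum; infer_instance
def pvWitness_ideal_spectrum : String := "GA"

def Spec_ideal_spectrum (s : String) (out : List Int) : Prop := out = ideal_spectrum_alt s
instance (s : String) (out : List Int) : Decidable (Spec_ideal_spectrum s out) := by unfold Spec_ideal_spectrum; infer_instance

-- ===== CLAIM (what is proved, stated in full; the proofs are below) =====
def Claim_equal_ideal_spectrum : Prop := ∀ (s : String), Dom_ideal_spectrum s → Pre_ideal_spectrum s → Spec_ideal_spectrum s (ideal_spectrum s)

-- ===== LEMMAS AND PROOFS =====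

-- both of B's folds compute (start total + sum, start list ++ running totals)
theorem foldB_eq (cs : List Char) : ∀ (a : Int) (l : List Int),
    cs.foldl (fun (st : Int × List Int) c =>
      (st.1 + getMass c, st.2 ++ [st.1 + getMass c])) (a, l)
    = (a + (cs.map getMass).sum, l ++ prefA cs a) := by
  induction cs with
  | nil => intro a l; simp [prefA]
  | cons c rest ih =>
    intro a l
    simp only [List.foldl_cons, ih, prefA, List.map_cons, List.sum_cons, Prod.mk.injEq]
    exact ⟨by ring, by simp⟩

theorem prefA_append (xs : List Char) (c : Char) : ∀ (a : Int),
    prefA (xs ++ [c]) a = prefA xs a ++ [a + (xs.map getMass).sum + getMass c] := by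
  induction xs with
  | nil => intro a; simp [prefA]
  | cons d rest ih =>
    intro a
    simp only [List.cons_append, prefA, ih, List.map_cons, List.sum_cons]
    congr 3
    ring

theorem suffA_head (cs : List Char) : ∀ m ms, suffA cs = m :: ms →
    m = (cs.map getMass).sum := by
  induction cs with
  | nil => intro m ms h; simp [suffA] at h
  | cons c rest ih =>
    intro m ms h
    cases hr : suffA rest with
    | nil =>
      rw [suffA, hr] at h
      cases rest with
      | nil => simp at h; simp [h.1]
      | cons d r => rw [suffA] at hr; cases h' : suffA r <;> simp [h'] at hr
    | cons m' ms' =>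
      rw [suffA, hr] at h
      have := ih m' ms' hr
      simp only [List.cons.injEq] at h
      simp [← h.1, this]

-- A's backward scan is the reverse of B's backward accumulation
theorem prefA_reverse (cs : List Char) :
    prefA cs.reverse 0 = (suffA cs).reverse := by
  induction cs with
  | nil => simp [prefA, suffA]
  | cons c rest ih =>
    rw [List.reverse_cons, prefA_append, ih]
    cases hr : suffA rest with
    | nil =>
      cases rest with
      | nil => simp [suffA]
      | cons d r => rw [suffA] at hr; cases h' : suffA r <;> simp [h'] at hr
    | cons m ms =>
      have hm := suffA_head rest m ms hr
      rw [suffA, hr]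
      simp [hm, add_comm]

theorem getMass_pos : ∀ c ∈ pvAlpha, 0 < getMass c := by
  intro c hc; fin_cases hc <;> decide

theorem lt_mem_prefA (cs : List Char) (hpos : ∀ c ∈ cs, 0 < getMass c) :
    ∀ (a : Int), ∀ z ∈ prefA cs a, a < z := by
  induction cs with
  | nil => intro a z hz; simp [prefA] at hz
  | cons c rest ih =>
    intro a z hz
    have hc : 0 < getMass c := hpos c (by simp)
    rw [prefA] at hz
    rcases List.mem_cons.1 hz with h | h
    · omega
    · have := ih (fun d hd => hpos d (by simp [hd])) (a + getMass c) z h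
      omega

theorem pairwise_cons_prefA (cs : List Char) (hpos : ∀ c ∈ cs, 0 < getMass c) :
    ∀ (a : Int), (a :: prefA cs a).Pairwise (· < ·) := by
  induction cs with
  | nil => intro a; simp [prefA]
  | cons c rest ih =>
    intro a
    have hc : 0 < getMass c := hpos c (by simp)
    have ih' := ih (fun d hd => hpos d (by simp [hd])) (a + getMass c)
    rw [prefA]
    refine List.Pairwise.cons (fun z hz => ?_) ih'
    rcases List.mem_cons.1 hz with h | h
    · omega
    · have := lt_mem_prefA rest (fun d hd => hpos d (by simp [hd])) (a + getMass c) z h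
      omega

theorem mem_mergeB : ∀ (xs ys : List Int) (z : Int),
    z ∈ mergeB xs ys ↔ z ∈ xs ∨ z ∈ ys := by
  intro xs ys
  induction xs, ys using mergeB.induct with
  | case1 ys => intro z; simp [mergeB]
  | case2 x xs => intro z; simp [mergeB]
  | case3 x xs y ys h ih =>
    intro z; rw [mergeB]; simp only [if_pos h]
    simp [ih z, List.mem_cons]; tauto
  | case4 x xs y ys h h2 ih =>
    intro z; rw [mergeB]; simp only [if_neg h, if_pos h2]
    simp [ih z, List.mem_cons]; tauto
  | case5 x xs y ys h h2 ih =>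
    intro z; rw [mergeB]; simp only [if_neg h, if_neg h2]
    have hxy : x = y := by omega
    simp [ih z, List.mem_cons, hxy]; tauto

theorem pairwise_mergeB : ∀ (xs ys : List Int),
    xs.Pairwise (· < ·) → ys.Pairwise (· < ·) → (mergeB xs ys).Pairwise (· < ·) := by
  intro xs ys
  induction xs, ys using mergeB.induct with
  | case1 ys => intro _ h; simpa [mergeB] using h
  | case2 x xs => intro h _; simpa [mergeB] using h
  | case3 x xs y ys h ih =>
    intro hx hy
    rw [mergeB]; simp only [if_pos h]
    refine List.Pairwise.cons (fun z hz => ?_) (ih (List.Pairwise.of_cons hx) hy)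
    rcases (mem_mergeB _ _ z).1 hz with hm | hm
    · exact (List.pairwise_cons.1 hx).1 z hm
    · rcases List.mem_cons.1 hm with rfl | hm'
      · exact h
      · exact lt_trans h ((List.pairwise_cons.1 hy).1 z hm')
  | case4 x xs y ys h h2 ih =>
    intro hx hy
    rw [mergeB]; simp only [if_neg h, if_pos h2]
    refine List.Pairwise.cons (fun z hz => ?_) (ih hx (List.Pairwise.of_cons hy))
    rcases (mem_mergeB _ _ z).1 hz with hm | hm
    · rcases List.mem_cons.1 hm with rfl | hm'
      · exact h2
      · exact lt_trans h2 ((List.pairwise_cons.1 hx).1 z hm')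
    · exact (List.pairwise_cons.1 hy).1 z hm
  | case5 x xs y ys h h2 ih =>
    intro hx hy
    have hxy : x = y := by omega
    rw [mergeB]; simp only [if_neg h, if_neg h2]
    refine List.Pairwise.cons (fun z hz => ?_) (ih (List.Pairwise.of_cons hx) (List.Pairwise.of_cons hy))
    rcases (mem_mergeB _ _ z).1 hz with hm | hm
    · exact (List.pairwise_cons.1 hx).1 z hm
    · exact hxy ▸ (List.pairwise_cons.1 hy).1 z hm

-- ===== VERDICT (by name: the statement is the Claim_ definition above) =====
theorem ideal_spectrum_spec : Claim_equal_ideal_spectrum := by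
  intro s _ hpre
  have hne : s.toList ≠ [] := hpre.1
  have hpos : ∀ c ∈ s.toList, 0 < getMass c := by
    intro c hc
    exact getMass_pos c (by simpa using List.all_eq_true.1 hpre.2 c hc)
  have hposr : ∀ c ∈ s.toList.reverse, 0 < getMass c := by
    intro c hc; exact hpos c (List.mem_reverse.1 hc)
  show ideal_spectrum s = ideal_spectrum_alt s
  unfold ideal_spectrum ideal_spectrum_alt
  dsimp only
  rw [foldB_eq, foldB_eq]
  simp only [List.nil_append]
  -- the merged list
  set M := mergeB ((0 : Int) :: prefA s.toList 0) (prefA s.toList.reverse 0) with hM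
  have hMpair : M.Pairwise (· < ·) := by
    apply pairwise_mergeB
    · exact pairwise_cons_prefA s.toList hpos 0
    · exact (pairwise_cons_prefA s.toList.reverse hposr 0).of_cons
  have hMnodup : M.Nodup := hMpair.imp (fun h => ne_of_lt h)
  have hspec_nodup : (PySem.Set.update (PySem.Set.update (PySem.Set.ofList [(0:Int)])
      (prefA s.toList 0)) (suffA s.toList)).Nodup :=
    PySem.Set.nodup_update _ _ (PySem.Set.nodup_update _ _ (PySem.Set.nodup_ofList _))
  have hmem : ∀ z : Int, z ∈ M ↔ z ∈ PySem.Set.update (PySem.Set.update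
      (PySem.Set.ofList [(0:Int)]) (prefA s.toList 0)) (suffA s.toList) := by
    intro z
    rw [hM, mem_mergeB, prefA_reverse, PySem.Set.mem_update, PySem.Set.mem_update,
      PySem.Set.mem_ofList]
    simp [List.mem_cons]
  have hperm : M.Perm (PySem.Set.update (PySem.Set.update (PySem.Set.ofList [(0:Int)])
      (prefA s.toList 0)) (suffA s.toList)) :=
    (List.perm_ext_iff_of_nodup hMnodup hspec_nodup).2 hmem
  exact PySem.List.sorted_id_eq_of_perm_of_pairwise _ _ hperm (hMpair.imp le_of_lt)
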